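-- pv_equiv track=rewrite | github.com/ThripleT/AdventOfCode2025 | tenSecondV2.py | create_possibilities
-- ===== SOURCE A (Python) =====
-- def create_possibilities(buttons, depth, estimate=0):
--     possibilities = []
--     for i in range(buttons[0][1]+1):
--         if estimate + i <= buttons[0][1]:
--             if depth > 0:
--                 for possibility in create_possibilities(buttons, depth-1, estimate+i):
--                     possibilities.append([i]+possibility)
--             else:
--                 possibilities.append([i])
--         else:
--             break
--     return possibilities
-- ===== SOURCE B (Python) =====
-- def create_possibilities(buttons, depth, estimate=0):
--     M = buttons[0][1]
--     work = [([], estimate)]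
--     for _ in range(max(depth, 0) + 1):
--         if not work:
--             break
--         nxt = []
--         for seq, s in work:
--             limit = min(M, M - s)
--             for i in range(limit + 1):
--                 nxt.append((seq + [i], s + i))
--         work = nxt
--     return [seq for seq, _ in work]
-- ===== Notes on version B (the rewrite author's own statement) =====
-- stated objective: alternative
-- what changed: Replaces A's depth-first recursion (recursing once per remaining position) by an iterative breadth-first worklist: one pass per position extends every partial sequence by each admissible next value, preserving the lexicographic output order.
-- outside the precondition, e.g. on create_possibilities([], 0, 0): A raises IndexError, B raises IndexError; on create_possibilities([[5]], 1, 0): A raises IndexError, B raises IndexError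
import Mathlib
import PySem

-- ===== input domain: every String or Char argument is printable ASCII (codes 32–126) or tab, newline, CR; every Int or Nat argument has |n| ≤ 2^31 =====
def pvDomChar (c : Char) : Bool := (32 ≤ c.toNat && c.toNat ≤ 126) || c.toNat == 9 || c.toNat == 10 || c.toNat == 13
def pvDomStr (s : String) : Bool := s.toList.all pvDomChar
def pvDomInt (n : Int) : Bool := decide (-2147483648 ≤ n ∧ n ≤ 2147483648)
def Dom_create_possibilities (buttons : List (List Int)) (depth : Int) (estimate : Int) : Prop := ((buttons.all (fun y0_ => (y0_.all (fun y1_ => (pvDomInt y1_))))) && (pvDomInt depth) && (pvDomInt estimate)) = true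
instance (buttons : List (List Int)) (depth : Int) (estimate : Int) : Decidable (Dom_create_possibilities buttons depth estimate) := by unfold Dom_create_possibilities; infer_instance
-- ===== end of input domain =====

-- B replaces A's depth-first recursion by an iterative breadth-first worklist build (alternative decomposition, same output order).

-- ===== PORT A =====
-- A's for-loop with break at the base level (depth == 0): append [i] while estimate+i <= M, stop at the first failure.
def pvAloopBase (M est : Int) : List Int → List (List Int)
  | [] => []
  | i :: rest => if est + i ≤ M then [i] :: pvAloopBase M est rest else []

-- A's for-loop with break at a recursive level: prepend i to each recursive possibility, stop at the first failure.
def pvAloopRec (f : Int → List (List Int)) (M est : Int) : List Int → List (List Int)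
  | [] => []
  | i :: rest => if est + i ≤ M then (f (est + i)).map (fun p => i :: p) ++ pvAloopRec f M est rest else []

-- A's recursion on depth (fuel = depth.toNat: Python's 'depth > 0' test, depth-1 on recursion).
def pvArec (M : Int) : Nat → Int → List (List Int)
  | 0, est => pvAloopBase M est (PySem.List.pyRange 0 (M + 1) 1)
  | n + 1, est => pvAloopRec (pvArec M n) M est (PySem.List.pyRange 0 (M + 1) 1)

def create_possibilities (buttons : List (List Int)) (depth : Int) (estimate : Int) : List (List Int) :=
  match PySem.List.pyGet? buttons 0 with
  | none => []  -- Python raises IndexError here; excluded by Pre_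
  | some b0 =>
    match PySem.List.pyGet? b0 1 with
    | none => []  -- Python raises IndexError here; excluded by Pre_
    | some M => pvArec M depth.toNat estimate

-- ===== PORT B =====
-- one pass of Source B's outer loop: extend every (seq, s) of the worklist by each admissible i in ascending order
def pvBstep (M : Int) : List (List Int × Int) → List (List Int × Int)
  | [] => []
  | (seq, s) :: rest =>
      (PySem.List.pyRange 0 (min M (M - s) + 1) 1).map (fun i => (seq ++ [i], s + i)) ++ pvBstep M rest

-- Source B's 'for _ in range(max(depth,0)+1)' driver with its early break on an empty worklist
def pvBloop (M : Int) : Nat → List (List Int × Int) → List (List Int × Int)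
  | 0, w => w
  | n + 1, w => if w = [] then [] else pvBloop M n (pvBstep M w)

def create_possibilities_alt (buttons : List (List Int)) (depth : Int) (estimate : Int) : List (List Int) :=
  match PySem.List.pyGet? buttons 0 with
  | none => []  -- Python raises IndexError here; excluded by Pre_
  | some b0 =>
    match PySem.List.pyGet? b0 1 with
    | none => []  -- Python raises IndexError here; excluded by Pre_
    | some M => (pvBloop M (depth.toNat + 1) [([], estimate)]).map Prod.fst

-- ===== PRECONDITION & SPEC =====
-- Pre_ excludes exactly the inputs where Python A raises IndexError on buttons[0][1]
def Pre_create_possibilities (buttons : List (List Int)) (depth : Int) (estimate : Int) : Prop :=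
  buttons ≠ [] ∧ 2 ≤ buttons.headI.length
instance (buttons : List (List Int)) (depth : Int) (estimate : Int) : Decidable (Pre_create_possibilities buttons depth estimate) := by unfold Pre_create_possibilities; infer_instance

def pvWitness_create_possibilities : List (List Int) × Int × Int := ([[0, 2]], 1, 0)

def Spec_create_possibilities (buttons : List (List Int)) (depth : Int) (estimate : Int) (out : List (List Int)) : Prop := out = create_possibilities_alt buttons depth estimate
instance (buttons : List (List Int)) (depth : Int) (estimate : Int) (out : List (List Int)) : Decidable (Spec_create_possibilities buttons depth estimate out) := by unfold Spec_create_possibilities; infer_instance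

-- ===== CLAIM (what is proved, stated in full; the proofs are below) =====
def Claim_equal_create_possibilities : Prop := ∀ (buttons : List (List Int)) (depth : Int) (estimate : Int), Dom_create_possibilities buttons depth estimate → Pre_create_possibilities buttons depth estimate → Spec_create_possibilities buttons depth estimate (create_possibilities buttons depth estimate)

-- ===== LEMMAS AND PROOFS =====

-- A's base-level loop over range(M+1) with break = a map over the truncated range
theorem pvAloopBase_range (M est a b : Int) :
    pvAloopBase M est (PySem.List.pyRange a b 1)
      = (PySem.List.pyRange a (min b (M - est + 1)) 1).map (fun i => [i]) := by
  by_cases hab : a < b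
  · rw [PySem.List.pyRange_one_cons hab]
    by_cases hc : est + a ≤ M
    · have h2 : a < min b (M - est + 1) := by omega
      rw [PySem.List.pyRange_one_cons h2]
      simp only [pvAloopBase, if_pos hc, List.map_cons]
      rw [pvAloopBase_range M est (a + 1) b]
    · have h2 : min b (M - est + 1) ≤ a := by omega
      rw [PySem.List.pyRange_one_eq_nil h2]
      simp [pvAloopBase, hc]
  · have h1 : b ≤ a := by omega
    have h2 : min b (M - est + 1) ≤ a := by omega
    rw [PySem.List.pyRange_one_eq_nil h1, PySem.List.pyRange_one_eq_nil h2]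
    rfl
termination_by (b - a).toNat
decreasing_by omega

-- A's recursive-level loop over range(M+1) with break = a flatMap over the truncated range
theorem pvAloopRec_range (f : Int → List (List Int)) (M est a b : Int) :
    pvAloopRec f M est (PySem.List.pyRange a b 1)
      = (PySem.List.pyRange a (min b (M - est + 1)) 1).flatMap
          (fun i => (f (est + i)).map (fun p => i :: p)) := by
  by_cases hab : a < b
  · rw [PySem.List.pyRange_one_cons hab]
    by_cases hc : est + a ≤ M
    · have h2 : a < min b (M - est + 1) := by omega
      rw [PySem.List.pyRange_one_cons h2]
      simp only [pvAloopRec, if_pos hc, List.flatMap_cons]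
      rw [pvAloopRec_range f M est (a + 1) b]
    · have h2 : min b (M - est + 1) ≤ a := by omega
      rw [PySem.List.pyRange_one_eq_nil h2]
      simp [pvAloopRec, hc]
  · have h1 : b ≤ a := by omega
    have h2 : min b (M - est + 1) ≤ a := by omega
    rw [PySem.List.pyRange_one_eq_nil h1, PySem.List.pyRange_one_eq_nil h2]
    rfl
termination_by (b - a).toNat
decreasing_by omega

theorem pvBstep_append (M : Int) (w1 w2 : List (List Int × Int)) :
    pvBstep M (w1 ++ w2) = pvBstep M w1 ++ pvBstep M w2 := by
  induction w1 with
  | nil => rfl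
  | cons e rest ih => obtain ⟨seq, s⟩ := e; simp [pvBstep, ih]

theorem pvBloop_nil (M : Int) (n : Nat) : pvBloop M n [] = [] := by
  cases n <;> rfl

-- the early break never changes the result: one pass on [] is again []
theorem pvBloop_succ (M : Int) (n : Nat) (w : List (List Int × Int)) :
    pvBloop M (n + 1) w = pvBloop M n (pvBstep M w) := by
  by_cases h : w = []
  · subst h; simp [pvBloop, pvBstep, pvBloop_nil]
  · simp [pvBloop, h]

theorem pvBloop_append (M : Int) (n : Nat) (w1 w2 : List (List Int × Int)) :
    pvBloop M n (w1 ++ w2) = pvBloop M n w1 ++ pvBloop M n w2 := by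
  induction n generalizing w1 w2 with
  | zero => rfl
  | succ n ih => rw [pvBloop_succ, pvBstep_append, ih, pvBloop_succ, pvBloop_succ]

theorem pvBloop_flatMap (M : Int) (n : Nat) (w : List (List Int × Int)) :
    pvBloop M n w = w.flatMap (fun e => pvBloop M n [e]) := by
  induction w with
  | nil => simp [pvBloop_nil]
  | cons e rest ih =>
    have : e :: rest = [e] ++ rest := rfl
    rw [this, pvBloop_append, ih]; rfl

theorem pvBstep_singleton (M : Int) (seq : List Int) (s : Int) :
    pvBstep M [(seq, s)]
      = (PySem.List.pyRange 0 (min M (M - s) + 1) 1).map (fun i => (seq ++ [i], s + i)) := by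
  simp [pvBstep]

-- main invariant: fuel+1 breadth-first passes from a single seed equal A's depth-first recursion, shifted by the seed prefix
theorem pvMain (M : Int) (fuel : Nat) :
    ∀ (est : Int) (seq : List Int),
      (pvBloop M (fuel + 1) [(seq, est)]).map Prod.fst
        = (pvArec M fuel est).map (fun p => seq ++ p) := by
  induction fuel with
  | zero =>
    intro est seq
    have hmin : min (M + 1) (M - est + 1) = min M (M - est) + 1 := by omega
    rw [pvBloop_succ, pvBstep_singleton]
    simp only [pvBloop, pvArec, pvAloopBase_range, hmin, List.map_map]
    rfl
  | succ n ih =>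
    intro est seq
    have hmin : min (M + 1) (M - est + 1) = min M (M - est) + 1 := by omega
    rw [pvBloop_succ, pvBstep_singleton, pvBloop_flatMap, List.flatMap_map, List.map_flatMap]
    have lhs_eq : ∀ i : Int,
        (pvBloop M (n + 1) [(seq ++ [i], est + i)]).map Prod.fst
          = (pvArec M n (est + i)).map (fun p => (seq ++ [i]) ++ p) := fun i => ih (est + i) (seq ++ [i])
    calc (PySem.List.pyRange 0 (min M (M - est) + 1) 1).flatMap
            (fun i => (pvBloop M (n + 1) [(seq ++ [i], est + i)]).map Prod.fst)
        = (PySem.List.pyRange 0 (min M (M - est) + 1) 1).flatMap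
            (fun i => (pvArec M n (est + i)).map (fun p => (seq ++ [i]) ++ p)) := by
          refine List.flatMap_congr ?_; intro i _; exact lhs_eq i
      _ = (pvArec M (n + 1) est).map (fun p => seq ++ p) := by
          simp only [pvArec, pvAloopRec_range, hmin, List.map_flatMap, List.map_map]
          refine List.flatMap_congr ?_; intro i _
          refine (List.map_congr_left ?_)
          intro p _
          simp [Function.comp]

-- ===== VERDICT (by name: the statement is the Claim_ definition above) =====
theorem create_possibilities_spec : Claim_equal_create_possibilities := by
  intro buttons depth estimate _ _
  unfold Spec_create_possibilities create_possibilities create_possibilities_alt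
  cases PySem.List.pyGet? buttons 0 with
  | none => rfl
  | some b0 =>
    dsimp only
    cases PySem.List.pyGet? b0 1 with
    | none => rfl
    | some M =>
      dsimp only
      rw [pvMain M depth.toNat estimate []]
      simp
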